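-- pv_equiv track=rewrite | github.com/amos123666/studious-telegram | app/preprocessor/preprocess.py | create_data_structures
-- ===== SOURCE A (Python) =====
-- def create_data_structures(posts):
--     dict_q = {}
--     dict_a = {}
--     for i in range(len(posts)):
--         li = []
--         if posts[i][1] not in dict_q:
--             li.append(posts[i][0])
--             li.append(posts[i][2])
--             dict_q[posts[i][1]] = li
--             dict_a[posts[i][1]] = []
--         else:
--             li.append(posts[i][0])
--             li.append(posts[i][2])
--             val = dict_a.get(posts[i][1])
--             val.append(li)
--             dict_a[posts[i][1]] = val
--     return dict_q, dict_a
-- ===== SOURCE B (Python) =====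
-- def create_data_structures(posts):
--     # Two-phase: group posts by their key field first, then split each group
--     # into its question (head) and its answers (tail).
--     groups = {}
--     for p in posts:
--         k = p[1]
--         groups[k] = groups.get(k, []) + [p]
--     dict_q = {k: [g[0][0], g[0][2]] for k, g in groups.items()}
--     dict_a = {k: [[p[0], p[2]] for p in g[1:]] for k, g in groups.items()}
--     return dict_q, dict_a
-- ===== Notes on version B (the rewrite author's own statement) =====
-- stated objective: alternative
-- what changed: Replaces the single membership-branching loop that maintains both dicts at once with a two-phase group-then-split: one pass builds an ordered grouping by posts[i][1], then the question dict (head of each group) and answer dict (tail of each group) are derived from the grouping.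
import Mathlib
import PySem

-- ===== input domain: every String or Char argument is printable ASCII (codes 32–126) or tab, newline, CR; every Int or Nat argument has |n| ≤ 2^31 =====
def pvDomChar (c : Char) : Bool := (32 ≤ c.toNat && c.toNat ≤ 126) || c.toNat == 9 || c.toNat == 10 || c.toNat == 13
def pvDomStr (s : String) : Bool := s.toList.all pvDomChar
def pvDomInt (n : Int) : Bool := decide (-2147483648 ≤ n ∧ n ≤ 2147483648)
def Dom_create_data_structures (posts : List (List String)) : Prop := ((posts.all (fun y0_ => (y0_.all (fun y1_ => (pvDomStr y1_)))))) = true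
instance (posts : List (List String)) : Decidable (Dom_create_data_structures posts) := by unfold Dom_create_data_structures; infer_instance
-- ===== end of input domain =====

-- B replaces A's single membership-branching loop by a two-phase group-then-split
-- (same contents and insertion order); equivalence of return values is proved on rows of length ≥ 3.


-- ===== PORT A =====
-- loop body of A: posts[i][j] ported with pyGetD (exact under Pre_: every row has length ≥ 3);
-- li is built by two appends, dict_a.get(key) + append + re-insert as in the Python.
def aStep (st : PySem.Dict String (List String) × PySem.Dict String (List (List String)))
    (p : List String) :
    PySem.Dict String (List String) × PySem.Dict String (List (List String)) :=
  let key := PySem.List.pyGetD p 1 ""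
  if st.1.contains key = false then
    let li := (([] : List String) ++ [PySem.List.pyGetD p 0 ""]) ++ [PySem.List.pyGetD p 2 ""]
    (st.1.insert key li, st.2.insert key [])
  else
    let li := (([] : List String) ++ [PySem.List.pyGetD p 0 ""]) ++ [PySem.List.pyGetD p 2 ""]
    (st.1, st.2.insert key (st.2.getD key [] ++ [li]))

def create_data_structures (posts : List (List String)) : (List (String × List String)) × (List (String × List (List String))) :=
  let st := (PySem.List.pyRange 0 (PySem.List.len posts)).foldl
    (fun st i => aStep st (PySem.List.pyGetD posts i []))
    (PySem.Dict.empty, PySem.Dict.empty)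
  (st.1.items, st.2.items)

-- ===== PORT B =====
def bStep (g : PySem.Dict String (List (List String))) (p : List String) :
    PySem.Dict String (List (List String)) :=
  let k := PySem.List.pyGetD p 1 ""
  g.insert k (g.getD k [] ++ [p])

-- question entry of a group: [g[0][0], g[0][2]]
def qOfAlt (rows : List (List String)) : List String :=
  [PySem.List.pyGetD (rows.headD []) 0 "", PySem.List.pyGetD (rows.headD []) 2 ""]

-- answer entries of a group: [[p[0], p[2]] for p in g[1:]]
def aOfAlt (rows : List (List String)) : List (List String) :=
  (rows.drop 1).map (fun p => [PySem.List.pyGetD p 0 "", PySem.List.pyGetD p 2 ""])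

def create_data_structures_alt (posts : List (List String)) : (List (String × List String)) × (List (String × List (List String))) :=
  let g := posts.foldl bStep PySem.Dict.empty
  (g.items.map (fun q => (q.1, qOfAlt q.2)),
   g.items.map (fun q => (q.1, aOfAlt q.2)))

-- ===== PRECONDITION & SPEC =====
-- Pre_ excludes exactly the inputs on which A raises IndexError: a row with fewer than 3 fields.
def Pre_create_data_structures (posts : List (List String)) : Prop :=
  ∀ p ∈ posts, 3 ≤ p.length
instance (posts : List (List String)) : Decidable (Pre_create_data_structures posts) := by
  unfold Pre_create_data_structures; infer_instance

def pvWitness_create_data_structures : List (List String) :=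
  [["a1", "q1", "b1"], ["a2", "q1", "b2"], ["a3", "q2", "b3"]]

def Spec_create_data_structures (posts : List (List String)) (out : (List (String × List String)) × (List (String × List (List String)))) : Prop := out = create_data_structures_alt posts
instance (posts : List (List String)) (out : (List (String × List String)) × (List (String × List (List String)))) : Decidable (Spec_create_data_structures posts out) := by unfold Spec_create_data_structures; infer_instance

-- ===== CLAIM (what is proved, stated in full; the proofs are below) =====
def Claim_equal_create_data_structures : Prop := ∀ (posts : List (List String)), Dom_create_data_structures posts → Pre_create_data_structures posts → Spec_create_data_structures posts (create_data_structures posts)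

-- ===== LEMMAS AND PROOFS =====

-- the entry of a Nodup-keyed dict at a present key is unique
lemma entry_unique {ν : Type} (d : PySem.Dict String ν) {k : String} {v : ν}
    (hmem : (k, v) ∈ d.items) (hnd : d.keys.Nodup)
    {q : String × ν} (hq : q ∈ d.items) (hk : q.1 = k) : q = (k, v) := by
  have h1 := PySem.Dict.get?_of_mem_items d hmem hnd
  have h2 := PySem.Dict.get?_of_mem_items d (k := q.1) (v := q.2) (by simpa using hq) hnd
  rw [hk, h1] at h2
  obtain ⟨a, b⟩ := q
  simp_all

-- one step of A equals one step of B, through the group-splitting maps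
lemma step_inv (dq : PySem.Dict String (List String))
    (da : PySem.Dict String (List (List String)))
    (g : PySem.Dict String (List (List String))) (p : List String)
    (hnd : g.keys.Nodup) (hne : ∀ q ∈ g.items, q.2 ≠ [])
    (hq : dq.items = g.items.map (fun q => (q.1, qOfAlt q.2)))
    (ha : da.items = g.items.map (fun q => (q.1, aOfAlt q.2))) :
    (aStep (dq, da) p).1.items = (bStep g p).items.map (fun q => (q.1, qOfAlt q.2)) ∧
    (aStep (dq, da) p).2.items = (bStep g p).items.map (fun q => (q.1, aOfAlt q.2)) ∧
    (bStep g p).keys.Nodup ∧ (∀ q ∈ (bStep g p).items, q.2 ≠ []) := by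
  set k := PySem.List.pyGetD p 1 "" with hk
  have hkeysq : dq.keys = g.keys := by
    simp only [PySem.Dict.keys, hq, List.map_map]; rfl
  have hkeysa : da.keys = g.keys := by
    simp only [PySem.Dict.keys, ha, List.map_map]; rfl
  have hcq : dq.contains k = g.contains k := by
    simp [PySem.Dict.contains_eq_decide_mem_keys, hkeysq]
  have hca : da.contains k = g.contains k := by
    simp [PySem.Dict.contains_eq_decide_mem_keys, hkeysa]
  by_cases hc : g.contains k = true
  · -- key already present: A appends to dict_a; B appends to the group
    obtain ⟨rows, hrows⟩ : ∃ rows, (k, rows) ∈ g.items := by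
      have : k ∈ g.keys := (PySem.Dict.contains_iff_mem_keys g k).mp hc
      simp only [PySem.Dict.keys, List.mem_map] at this
      obtain ⟨q, hq', hq1⟩ := this
      exact ⟨q.2, by rwa [← hq1, Prod.mk.eta]⟩
    have hrne : rows ≠ [] := hne _ hrows
    have hgetg : g.getD k [] = rows := PySem.Dict.getD_of_mem_items g hrows hnd []
    have hgeta : da.getD k [] = aOfAlt rows := by
      refine PySem.Dict.getD_of_mem_items da ?_ (by rwa [hkeysa]) []
      rw [ha]; exact List.mem_map.mpr ⟨(k, rows), hrows, rfl⟩
    have hbitems : (bStep g p).items =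
        g.items.map (fun q => if (q.1 == k) = true then (k, rows ++ [p]) else q) := by
      simp only [bStep, ← hk, hgetg]
      exact PySem.Dict.items_insert_of_contains g _ hc
    refine ⟨?_, ?_, ?_, ?_⟩
    · -- dict_q unchanged; the head of each group is unchanged too
      simp only [aStep, ← hk, hcq, hc, Bool.true_eq_false, if_false]
      simp only [hbitems, List.map_map, hq]
      refine List.map_congr_left (fun q hmq => ?_)
      by_cases h1 : q.1 = k
      · have hqe : q = (k, rows) := entry_unique g hrows hnd hmq h1
        subst hqe
        simp only [Function.comp, beq_self_eq_true, reduceIte]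
        obtain ⟨r, rs, rfl⟩ := List.exists_cons_of_ne_nil hrne
        simp [qOfAlt]
      · simp [Function.comp, h1]
    · -- dict_a gains [p[0], p[2]] at key k; B's group gains p
      simp only [aStep, ← hk, hcq, hc, Bool.true_eq_false, if_false]
      simp only [hgeta]
      rw [PySem.Dict.items_insert_of_contains da _ (by rw [hca]; exact hc)]
      simp only [hbitems, List.map_map, ha, List.map_map]
      refine List.map_congr_left (fun q hmq => ?_)
      by_cases h1 : q.1 = k
      · have hqe : q = (k, rows) := entry_unique g hrows hnd hmq h1
        subst hqe
        simp only [Function.comp, beq_self_eq_true, reduceIte]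
        obtain ⟨r, rs, rfl⟩ := List.exists_cons_of_ne_nil hrne
        simp [aOfAlt]
      · simp [Function.comp, h1]
    · simpa [bStep, ← hk, hgetg] using
        (by rw [PySem.Dict.keys_insert_of_contains g (rows ++ [p]) hc]; exact hnd :
          (g.insert k (rows ++ [p])).keys.Nodup)
    · intro q hmq
      rw [hbitems] at hmq
      obtain ⟨q', hq', rfl⟩ := List.mem_map.mp hmq
      by_cases h1 : (q'.1 == k) = true
      · simp [h1]
      · simp only [h1]; exact hne _ hq'
  · -- fresh key: both sides append a new entry
    have hc' : g.contains k = false := by simpa using hc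
    have hget : g.getD k [] = [] := PySem.Dict.getD_of_not_contains g [] hc'
    have hbitems : (bStep g p).items = g.items ++ [(k, [p])] := by
      simp only [bStep, ← hk, hget]
      simpa using PySem.Dict.items_insert_of_not_contains g [p] hc'
    refine ⟨?_, ?_, ?_, ?_⟩
    · simp only [aStep, ← hk, hcq, hc', reduceIte]
      rw [PySem.Dict.items_insert_of_not_contains dq _ (by rw [hcq]; exact hc')]
      simp [hbitems, hq, qOfAlt]
    · simp only [aStep, ← hk, hcq, hc', reduceIte]
      rw [PySem.Dict.items_insert_of_not_contains da _ (by rw [hca]; exact hc')]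
      simp [hbitems, ha, aOfAlt]
    · have : (bStep g p).keys = g.keys ++ [k] := by
        simp only [bStep, ← hk, hget]
        simpa using PySem.Dict.keys_insert_of_not_contains g [p] hc'
      rw [this]
      have hknot : k ∉ g.keys := fun hmem =>
        absurd ((PySem.Dict.contains_iff_mem_keys g k).mpr hmem) (by simp [hc'])
      exact List.Nodup.append hnd (List.nodup_singleton _)
        (by simp only [List.disjoint_singleton]; exact hknot)
    · intro q hmq
      rw [hbitems] at hmq
      rcases List.mem_append.mp hmq with h | h
      · exact hne _ h
      · rw [List.mem_singleton] at h; subst h; simp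

-- folding the whole list preserves the group-splitting relation
lemma fold_inv (l : List (List String)) :
    ∀ (dq : PySem.Dict String (List String))
      (da : PySem.Dict String (List (List String)))
      (g : PySem.Dict String (List (List String))),
    g.keys.Nodup → (∀ q ∈ g.items, q.2 ≠ []) →
    dq.items = g.items.map (fun q => (q.1, qOfAlt q.2)) →
    da.items = g.items.map (fun q => (q.1, aOfAlt q.2)) →
    (l.foldl aStep (dq, da)).1.items = (l.foldl bStep g).items.map (fun q => (q.1, qOfAlt q.2)) ∧
    (l.foldl aStep (dq, da)).2.items = (l.foldl bStep g).items.map (fun q => (q.1, aOfAlt q.2)) := by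
  induction l with
  | nil => intro dq da g _ _ hq ha; exact ⟨hq, ha⟩
  | cons p l ih =>
    intro dq da g hnd hne hq ha
    obtain ⟨h1, h2, h3, h4⟩ := step_inv dq da g p hnd hne hq ha
    simpa [List.foldl_cons, Prod.mk.eta] using
      ih (aStep (dq, da) p).1 (aStep (dq, da) p).2 (bStep g p) h3 h4 h1 h2

-- ===== VERDICT (by name: the statement is the Claim_ definition above) =====
theorem create_data_structures_spec : Claim_equal_create_data_structures := by
  intro posts _ _
  unfold Spec_create_data_structures create_data_structures create_data_structures_alt
  rw [PySem.List.foldl_pyRange_zero_pyGetD posts [] aStep (PySem.Dict.empty, PySem.Dict.empty)]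
  obtain ⟨h1, h2⟩ := fold_inv posts PySem.Dict.empty PySem.Dict.empty PySem.Dict.empty
    (by simp [PySem.Dict.keys, PySem.Dict.empty]) (by simp [PySem.Dict.empty])
    (by simp [PySem.Dict.empty]) (by simp [PySem.Dict.empty])
  exact Prod.ext h1 h2
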